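-- pv_equiv track=rewrite | github.com/Curtis099/Python_Code-Snippets | product and sum of digits.py | productAndSum
-- ===== SOURCE A (Python) =====
-- def productAndSum(n):
--     a = 0
--     product = 1
--     sum = 0
--     strOfN = str(n)
--
--     while a < len(strOfN):
--         product  = product*int(strOfN[a])
--         sum = sum + int(strOfN[a])
--         diff = product-sum
--         a += 1
--
--     return diff
-- ===== SOURCE B (Python) =====
-- def productAndSum(n):
--     # Pure arithmetic: recursively peel decimal digits with divmod, no string at all.
--     def go(m):
--         if m < 10:
--             return (m, m)
--         p, s = go(m // 10)
--         d = m % 10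
--         return (p * d, s + d)
--     p, s = go(n)
--     return p - s
-- ===== Notes on version B (the rewrite author's own statement) =====
-- stated objective: alternative
-- what changed: A converts n to a string and runs one interleaved index loop accumulating product, sum and a running diff; B never builds a string: it extracts the digits arithmetically by a recursion on n // 10 and n % 10, returning the product-minus-sum of the recursive result.
import Mathlib
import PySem

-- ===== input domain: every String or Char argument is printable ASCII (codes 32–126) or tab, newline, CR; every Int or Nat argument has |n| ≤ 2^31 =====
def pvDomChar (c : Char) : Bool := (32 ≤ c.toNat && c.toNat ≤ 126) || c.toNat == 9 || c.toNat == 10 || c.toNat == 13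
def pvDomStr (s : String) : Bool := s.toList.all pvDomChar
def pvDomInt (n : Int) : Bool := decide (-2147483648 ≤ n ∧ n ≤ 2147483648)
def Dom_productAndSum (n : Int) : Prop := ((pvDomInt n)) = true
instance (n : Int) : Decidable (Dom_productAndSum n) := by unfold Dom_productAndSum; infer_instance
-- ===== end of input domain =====

-- B replaces A's string-based interleaved index loop by a divmod recursion on the number itself (objective: alternative).

-- ===== PORT A =====
-- A's while-loop over indices 0..len-1 of str(n), as structural recursion over the chars;
-- state = (product, sum, diff) with diff : Option Int (none = the not-yet-assigned 'diff', NameError if returned);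
-- outer 'none' = int() ValueError on a non-digit character.
def productAndSumLoopA : List Char → Int → Int → Option Int → Option (Option Int)
  | [], _, _, diff => some diff
  | c :: rest, product, sum, _ =>
    match PySem.Int.ofChars? [c] with
    | none => none
    | some d =>
      productAndSumLoopA rest (product * d) (sum + d) (some (product * d - (sum + d)))

def productAndSum (n : Int) : Int :=
  match productAndSumLoopA (PySem.Int.toChars n) 1 0 none with
  | some (some diff) => diff
  | _ => 0  -- unreachable under Pre_: ValueError (n < 0) / NameError (empty str, impossible)

-- ===== PORT B =====
-- go(m): (product, sum) of the decimal digits of m, by recursion on m // 10 with d = m % 10.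
def productAndSumGoB (m : Int) : Int × Int :=
  if m < 10 then (m, m)
  else
    let ps := productAndSumGoB (PySem.Int.floordiv m 10)
    let d := PySem.Int.mod m 10
    (ps.1 * d, ps.2 + d)
  termination_by m.toNat
  decreasing_by
    simp only [PySem.Int.floordiv]
    rw [Int.fdiv_eq_ediv]
    simp only [show ((0:Int) ≤ 10 ∨ (10:Int) ∣ _) = True from by simp, if_true]
    omega

def productAndSum_alt (n : Int) : Int :=
  (productAndSumGoB n).1 - (productAndSumGoB n).2

-- ===== PRECONDITION & SPEC =====
-- Pre_ excludes n < 0, on which Python A raises ValueError (int('-') on the sign character).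
def Pre_productAndSum (n : Int) : Prop := 0 ≤ n
instance (n : Int) : Decidable (Pre_productAndSum n) := by unfold Pre_productAndSum; infer_instance
def pvWitness_productAndSum : Int := (12345)

def Spec_productAndSum (n : Int) (out : Int) : Prop := out = productAndSum_alt n
instance (n : Int) (out : Int) : Decidable (Spec_productAndSum n out) := by unfold Spec_productAndSum; infer_instance

-- ===== CLAIM (what is proved, stated in full; the proofs are below) =====
def Claim_equal_productAndSum : Prop := ∀ (n : Int), Dom_productAndSum n → Pre_productAndSum n → Spec_productAndSum n (productAndSum n)

-- ===== LEMMAS AND PROOFS =====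

-- The decimal digit characters of m, most significant first (what str(m) spells for m ≥ 0).
def charDigits (m : Nat) : List Char :=
  if m < 10 then [Nat.digitChar m]
  else charDigits (m / 10) ++ [Nat.digitChar (m % 10)]
  termination_by m
  decreasing_by omega

theorem toDigitsCore_eq (fuel m : Nat) (ds : List Char) (h : m < fuel) :
    Nat.toDigitsCore 10 fuel m ds = charDigits m ++ ds := by
  induction fuel generalizing m ds with
  | zero => omega
  | succ fuel ih =>
    rw [Nat.toDigitsCore]
    by_cases hm : m < 10
    · have h0 : m / 10 = 0 := by omega
      rw [charDigits, if_pos hm]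
      simp [h0, Nat.mod_eq_of_lt hm]
    · have h0 : ¬ m / 10 = 0 := by omega
      rw [charDigits, if_neg hm]
      simp only [h0, if_false]
      rw [ih (m / 10) _ (by omega)]
      simp

theorem toChars_eq (n : Int) (h : 0 ≤ n) :
    PySem.Int.toChars n = charDigits n.toNat := by
  have hneg : ¬ n < 0 := by omega
  simp only [PySem.Int.toChars, hneg, if_false]
  unfold Nat.toDigits
  rw [toDigitsCore_eq _ _ _ (by omega)]
  simp

theorem parse_digitChar (d : Nat) (h : d < 10) :
    PySem.Int.ofChars? [Nat.digitChar d] = some (d : Int) := by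
  interval_cases d <;> decide

-- The digit values of m, most significant first.
def intDigits (m : Nat) : List Int :=
  if m < 10 then [(m : Int)]
  else intDigits (m / 10) ++ [((m % 10 : Nat) : Int)]
  termination_by m
  decreasing_by omega

theorem mapM_charDigits (m : Nat) :
    (charDigits m).mapM (fun c => PySem.Int.ofChars? [c]) = some (intDigits m) := by
  induction m using Nat.strong_induction_on with
  | _ m ih =>
    by_cases hm : m < 10
    · rw [charDigits, if_pos hm, intDigits, if_pos hm]
      simp [parse_digitChar m hm]
    · rw [charDigits, if_neg hm, intDigits, if_neg hm]
      rw [List.mapM_append, ih (m / 10) (by omega)]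
      simp [parse_digitChar (m % 10) (by omega)]

theorem intDigits_ne_nil (m : Nat) : intDigits m ≠ [] := by
  rw [intDigits]; split <;> simp

theorem goB_eq_folds (m : Nat) :
    productAndSumGoB (m : Int) =
      ((intDigits m).foldl (· * ·) 1, (intDigits m).foldl (· + ·) 0) := by
  induction m using Nat.strong_induction_on with
  | _ m ih =>
    by_cases hm : m < 10
    · rw [productAndSumGoB, if_pos (by exact_mod_cast hm), intDigits, if_pos hm]
      simp
    · rw [productAndSumGoB, if_neg (by exact_mod_cast hm), intDigits, if_neg hm]
      have hdiv : PySem.Int.floordiv (m : Int) 10 = ((m / 10 : Nat) : Int) := by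
        simp only [PySem.Int.floordiv]
        rw [Int.fdiv_eq_ediv]
        simp only [show ((0:Int) ≤ 10 ∨ (10:Int) ∣ (m:Int)) = True from by simp, if_true]
        omega
      have hmod : PySem.Int.mod (m : Int) 10 = ((m % 10 : Nat) : Int) := by
        simp only [PySem.Int.mod]
        rw [Int.fmod_eq_emod]
        simp only [show ((0:Int) ≤ 10 ∨ (10:Int) ∣ (m:Int)) = True from by simp, if_true]
        omega
      rw [hdiv, hmod, ih (m / 10) (by omega)]
      simp [List.foldl_append]

-- A's loop, run on any char list, equals the two folds over the successfully parsed digits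
-- (when the list is empty it returns the incoming diff instead).
theorem loopA_eq (cs : List Char) (p s : Int) (d : Option Int) :
    productAndSumLoopA cs p s d =
      (cs.mapM (fun c => PySem.Int.ofChars? [c])).map
        (fun ds => if ds.isEmpty then d
                   else some (ds.foldl (· * ·) p - ds.foldl (· + ·) s)) := by
  induction cs generalizing p s d with
  | nil => simp [productAndSumLoopA]
  | cons c rest ih =>
    simp only [productAndSumLoopA, List.mapM_cons]
    cases h : PySem.Int.ofChars? [c] with
    | none => simp
    | some d0 =>
      show productAndSumLoopA rest (p * d0) (s + d0) (some (p * d0 - (s + d0))) = _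
      rw [ih]
      cases hrest : rest.mapM (fun c => PySem.Int.ofChars? [c]) with
      | none => simp
      | some ds' =>
        simp only [Option.map_some, Option.pure_def]
        cases ds' <;> simp

-- ===== VERDICT (by name: the statements are the Claim_ definitions above) =====
theorem productAndSum_spec : Claim_equal_productAndSum := by
  intro n _ hpre
  unfold Spec_productAndSum productAndSum productAndSum_alt
  rw [loopA_eq, toChars_eq n hpre, mapM_charDigits]
  have hg : productAndSumGoB n = productAndSumGoB ((n.toNat : Nat) : Int) := by
    rw [Int.toNat_of_nonneg hpre]
  rw [hg, goB_eq_folds]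
  simp [intDigits_ne_nil n.toNat]
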